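-- pv_equiv track=rewrite | github.com/SumeshSurendran12/QuasarFX | modules/execution/gcapi_adapter.py | _is_rejection
-- ===== SOURCE A (Python) =====
-- def _is_rejection(status_text: str) -> bool:
--     text = status_text.lower()
--     rejection_tokens = (
--         "reject",
--         "error",
--         "failed",
--         "invalid",
--         "disable",
--         "closed",
--         "insufficient",
--         "denied",
--         "unable",
--     )
--     return any(token in text for token in rejection_tokens)
-- ===== SOURCE B (Python) =====
-- def _is_rejection(status_text: str) -> bool:
--     tokens = ("reject", "error", "failed", "invalid", "disable",
--               "closed", "insufficient", "denied", "unable")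
--     # single left-to-right pass simulating an NFA: `active` holds the remaining
--     # suffixes of all partially matched tokens at the current position
--     active = []
--     for c in status_text.lower():
--         nxt = []
--         for cand in active + list(tokens):
--             if cand[0] == c:
--                 if len(cand) == 1:
--                     return True
--                 nxt.append(cand[1:])
--         active = nxt
--     return False
-- ===== Notes on version B (the rewrite author's own statement) =====
-- stated objective: alternative
-- what changed: B scans the lowered text once while maintaining an explicit set of active partial-match states (remaining token suffixes), i.e. an NFA/Aho-Corasick-style simulation, instead of A's nine independent full substring scans.
import Mathlib
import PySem

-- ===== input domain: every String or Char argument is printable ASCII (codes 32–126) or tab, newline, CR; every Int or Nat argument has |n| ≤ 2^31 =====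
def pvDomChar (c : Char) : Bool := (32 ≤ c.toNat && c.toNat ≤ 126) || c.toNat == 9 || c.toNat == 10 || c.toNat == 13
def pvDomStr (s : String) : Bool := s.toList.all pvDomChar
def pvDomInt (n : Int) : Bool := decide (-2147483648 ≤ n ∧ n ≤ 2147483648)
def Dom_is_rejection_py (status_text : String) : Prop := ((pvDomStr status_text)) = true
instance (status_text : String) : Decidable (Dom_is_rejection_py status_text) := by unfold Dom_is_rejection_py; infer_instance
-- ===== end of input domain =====

-- B replaces A's nine independent substring scans by a single pass that simulates an NFA,
-- carrying the set of active partial-match states (remaining token suffixes); same return value.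

-- the nine rejection tokens (shared literal data, used by both ports)
def pvTokens : List String :=
  ["reject", "error", "failed", "invalid", "disable", "closed", "insufficient", "denied", "unable"]

-- ===== PORT A =====
-- A: text = status_text.lower(); return any(token in text for token in tokens)
def is_rejection_py (status_text : String) : Bool :=
  let text := PySem.Str.lower status_text
  pvTokens.any (fun token => PySem.Str.isIn token text)

-- ===== PORT B =====
-- B's loop body: for each char c, restart every token and advance every active state;
-- a state that reaches its last char (cand = [c]) means a full token matched → True.
def pvRun (tokens : List (List Char)) : List (List Char) → List Char → Bool
  | _, [] => false
  | active, c :: rest =>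
      let cands := active ++ tokens
      if cands.any (fun s => s == [c]) then true
      else
        pvRun tokens
          (cands.filterMap (fun s =>
            match s with
            | [] => none
            | d :: t => if d = c ∧ t ≠ [] then some t else none)) rest

def is_rejection_py_alt (status_text : String) : Bool :=
  pvRun (pvTokens.map String.toList) [] (PySem.Str.lower status_text).toList

-- ===== PRECONDITION & SPEC =====
def Spec_is_rejection_py (status_text : String) (out : Bool) : Prop := out = is_rejection_py_alt status_text
instance (status_text : String) (out : Bool) : Decidable (Spec_is_rejection_py status_text out) := by unfold Spec_is_rejection_py; infer_instance

-- ===== CLAIM (what is proved, stated in full; the proofs are below) =====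
def Claim_equal_is_rejection_py : Prop := ∀ (status_text : String), Dom_is_rejection_py status_text → Spec_is_rejection_py status_text (is_rejection_py status_text)

-- ===== LEMMAS AND PROOFS =====

-- invariant of the NFA pass: it accepts iff some active suffix is a prefix of the rest,
-- or some (nonempty) token occurs as an infix of the rest
theorem pvRun_iff (tokens : List (List Char)) :
    ∀ (s : List Char) (active : List (List Char)),
      pvRun tokens active s = true ↔
        (∃ a ∈ active, a ≠ [] ∧ a <+: s) ∨ (∃ t ∈ tokens, t ≠ [] ∧ t <:+: s) := by
  intro s
  induction s with
  | nil =>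
      intro active
      simp only [pvRun]
      constructor
      · intro h; exact absurd h (by simp)
      · rintro (⟨a, _, hne, hp⟩ | ⟨t, _, hne, hinf⟩)
        · exact absurd (List.prefix_nil.mp hp) hne
        · exact absurd (List.eq_nil_of_infix_nil hinf) hne
  | cons c rest ih =>
      intro active
      simp only [pvRun]
      split_ifs with h
      · simp only [true_iff]
        rw [List.any_eq_true] at h
        obtain ⟨cand, hmem, hc⟩ := h
        have hcand : cand = [c] := by simpa using hc
        rcases List.mem_append.mp hmem with ha | ht
        · exact Or.inl ⟨cand, ha, by simp [hcand]⟩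
        · exact Or.inr ⟨cand, ht, by simp [hcand], by
            rw [hcand]; exact (List.prefix_cons_inj c |>.mpr List.nil_prefix).isInfix⟩
      · rw [ih]
        have hmem_fm : ∀ a' : List Char,
            (a' ∈ (active ++ tokens).filterMap (fun s =>
              match s with
              | [] => none
              | d :: t => if d = c ∧ t ≠ [] then some t else none)) ↔
            (a' ≠ [] ∧ (c :: a') ∈ active ++ tokens) := by
          intro a'
          rw [List.mem_filterMap]
          constructor
          · rintro ⟨cand, hmem, hf⟩
            match cand with
            | [] => simp at hf
            | d :: t =>
                by_cases hdc : d = c ∧ t ≠ []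
                · simp only [if_pos hdc] at hf
                  obtain ⟨rfl, hne⟩ := hdc
                  cases hf
                  exact ⟨hne, hmem⟩
                · simp [if_neg hdc] at hf
          · rintro ⟨hne, hmem⟩
            exact ⟨c :: a', hmem, by simp [hne]⟩
        constructor
        · rintro (⟨a', ha', hne, hp⟩ | ⟨t, ht, hne, hinf⟩)
          · obtain ⟨-, hmem⟩ := (hmem_fm a').mp ha'
            rcases List.mem_append.mp hmem with hA | hT
            · exact Or.inl ⟨c :: a', hA, by simp, (List.prefix_cons_inj c).mpr hp⟩
            · exact Or.inr ⟨c :: a', hT, by simp, ((List.prefix_cons_inj c).mpr hp).isInfix⟩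
          · exact Or.inr ⟨t, ht, hne, hinf.trans (List.suffix_cons c rest).isInfix⟩
        · rintro (⟨a, ha, hne, hp⟩ | ⟨t, ht, hne, hinf⟩)
          · obtain ⟨d, tl, rfl⟩ : ∃ d tl, a = d :: tl := by
              cases a with
              | nil => exact absurd rfl hne
              | cons d tl => exact ⟨d, tl, rfl⟩
            obtain ⟨rfl, htl⟩ := List.cons_prefix_cons.mp hp
            rcases eq_or_ne tl [] with rfl | htlne
            · exact absurd (List.any_eq_true.mpr
                ⟨[d], List.mem_append.mpr (Or.inl ha), by simp⟩) h
            · exact Or.inl ⟨tl, (hmem_fm tl).mpr ⟨htlne, List.mem_append.mpr (Or.inl ha)⟩,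
                htlne, htl⟩
          · rcases List.infix_cons_iff.mp hinf with hpre | hinf'
            · obtain ⟨d, tl, rfl⟩ : ∃ d tl, t = d :: tl := by
                cases t with
                | nil => exact absurd rfl hne
                | cons d tl => exact ⟨d, tl, rfl⟩
              obtain ⟨rfl, htl⟩ := List.cons_prefix_cons.mp hpre
              rcases eq_or_ne tl [] with rfl | htlne
              · exact absurd (List.any_eq_true.mpr
                  ⟨[d], List.mem_append.mpr (Or.inr ht), by simp⟩) h
              · exact Or.inl ⟨tl, (hmem_fm tl).mpr ⟨htlne, List.mem_append.mpr (Or.inr ht)⟩,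
                  htlne, htl⟩
            · exact Or.inr ⟨t, ht, hne, hinf'⟩

theorem is_rejection_py_eq (status_text : String) :
    is_rejection_py status_text = is_rejection_py_alt status_text := by
  rw [Bool.eq_iff_iff]
  unfold is_rejection_py is_rejection_py_alt
  rw [pvRun_iff]
  rw [List.any_eq_true]
  constructor
  · rintro ⟨tok, htok, hin⟩
    refine Or.inr ⟨tok.toList, List.mem_map_of_mem htok, ?_, ?_⟩
    · revert htok; unfold pvTokens; intro htok
      fin_cases htok <;> decide
    · exact (PySem.Str.isIn_iff_infix tok _).mp hin
  · rintro (⟨a, ha, -, -⟩ | ⟨t, ht, -, hinf⟩)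
    · simp at ha
    · rw [List.mem_map] at ht
      obtain ⟨tok, htok, rfl⟩ := ht
      exact ⟨tok, htok, (PySem.Str.isIn_iff_infix tok _).mpr hinf⟩

-- ===== VERDICT (by name: the statement is the Claim_ definition above) =====
theorem is_rejection_py_spec : Claim_equal_is_rejection_py := by
  intro s _
  unfold Spec_is_rejection_py
  exact is_rejection_py_eq s
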